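-- pv_equiv track=rewrite | github.com/RobbertDHuisman/AdventOfCode2024 | day_11/part_2.py | count_amount
-- ===== SOURCE A (Python) =====
-- def count_amount(stones):
--     length = len(stones)
--     for i in range(length - 1, -1, -1):
--         for j in range(i-1, -1, -1):
--             if stones[i][0] == stones[j][0]:
--                 stones[j][1] = stones[j][1] + stones[i][1]
--                 del stones[i]
--                 break
--
--     return stones
-- ===== SOURCE B (Python) =====
-- def count_amount(stones):
--     # Single pass: accumulate into an insertion-ordered dict keyed by the first element.
--     # Note: A mutates `stones` in place; this equivalence is about the return VALUE only.
--     merged = {}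
--     for s in stones:
--         k = s[0]
--         if k in merged:
--             merged[k][1] = merged[k][1] + s[1]
--         else:
--             merged[k] = s
--     return list(merged.values())
-- ===== Notes on version B (the rewrite author's own statement) =====
-- stated objective: alternative
-- what changed: Replaces the reversed quadratic scan with in-place deletions by a single forward pass that accumulates counts into an insertion-ordered dict keyed by the first element.
-- outside the precondition, e.g. on count_amount([[]]): A returns [[]], B raises IndexError
import Mathlib
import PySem

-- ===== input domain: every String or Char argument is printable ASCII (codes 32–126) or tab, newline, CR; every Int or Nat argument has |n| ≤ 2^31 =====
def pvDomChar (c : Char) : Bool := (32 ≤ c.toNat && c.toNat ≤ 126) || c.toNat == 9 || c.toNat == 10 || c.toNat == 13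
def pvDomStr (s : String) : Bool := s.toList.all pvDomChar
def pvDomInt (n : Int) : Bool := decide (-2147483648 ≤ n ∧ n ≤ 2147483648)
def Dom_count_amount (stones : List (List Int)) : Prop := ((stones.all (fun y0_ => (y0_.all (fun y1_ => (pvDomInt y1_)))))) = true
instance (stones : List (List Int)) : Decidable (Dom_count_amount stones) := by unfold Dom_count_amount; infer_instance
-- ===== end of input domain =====

-- B merges rows in one forward pass accumulating into an insertion-ordered dict keyed by the first element,
-- instead of A's reversed nested scans with in-place deletion; A mutates `stones` in place, so the
-- equivalence proved here is about the RETURN value.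

-- ===== PORT A =====
-- stones[j][1] = stones[j][1] + stones[i][1]; del stones[i]
def pa_merge (stones : List (List Int)) (i j : Nat) : List (List Int) :=
  (stones.set j ((stones.getD j []).set 1
    ((stones.getD j []).getD 1 0 + (stones.getD i []).getD 1 0))).eraseIdx i

-- for j in range(i-1, -1, -1): … break   (fuel jp = j+1; j counts down)
def pa_inner (stones : List (List Int)) (i : Nat) : Nat → List (List Int)
  | 0 => stones
  | jp + 1 =>
    if (stones.getD i []).getD 0 0 = (stones.getD jp []).getD 0 0 then
      pa_merge stones i jp
    else pa_inner stones i jp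

-- for i in range(length-1, -1, -1): …   (fuel ip = i+1)
def pa_outer (stones : List (List Int)) : Nat → List (List Int)
  | 0 => stones
  | ip + 1 => pa_outer (pa_inner stones ip ip) ip

def count_amount (stones : List (List Int)) : List (List Int) :=
  pa_outer stones stones.length

-- ===== PORT B =====
-- body of B's for-loop: k = s[0]; if k in merged: merged[k][1] += s[1] else merged[k] = s
def pb_step (d : PySem.Dict Int (List Int)) (s : List Int) : PySem.Dict Int (List Int) :=
  let k := s.getD 0 0
  if d.contains k then
    d.insert k (((d.getD k []).set 1 ((d.getD k []).getD 1 0 + s.getD 1 0)))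
  else
    d.insert k s

def count_amount_alt (stones : List (List Int)) : List (List Int) :=
  (stones.foldl pb_step PySem.Dict.empty).values

-- ===== PRECONDITION & SPEC =====
-- Pre_ excludes inputs where some inner list is empty or where a duplicated key sits in an inner list of
-- length < 2: on those Python A raises IndexError — except for the single excluded shape whose only row is
-- the empty row (see the cited example), where A never compares and returns its argument unchanged while B,
-- which always reads s[0], raises; that accidental return of A is excluded as well.
def Pre_count_amount (stones : List (List Int)) : Prop :=
  ∀ l ∈ stones, l ≠ [] ∧
    (stones.countP (fun m => m.getD 0 0 == l.getD 0 0) ≤ 1 ∨ 2 ≤ l.length)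
instance (stones : List (List Int)) : Decidable (Pre_count_amount stones) := by
  unfold Pre_count_amount; infer_instance

def pvWitness_count_amount : List (List Int) := [[1, 2], [3, 4], [1, 5]]

def Spec_count_amount (stones : List (List Int)) (out : List (List Int)) : Prop := out = count_amount_alt stones
instance (stones : List (List Int)) (out : List (List Int)) : Decidable (Spec_count_amount stones out) := by unfold Spec_count_amount; infer_instance

-- ===== CLAIM (what is proved, stated in full; the proofs are below) =====
def Claim_equal_count_amount : Prop := ∀ (stones : List (List Int)), Dom_count_amount stones → Pre_count_amount stones → Spec_count_amount stones (count_amount stones)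

-- ===== LEMMAS AND PROOFS =====

-- key of a row, as both programs read it
def rowKey (r : List Int) : Int := r.getD 0 0

theorem getD_set_eq (l : List Int) (n : Nat) (a d : Int) (h : n < l.length) :
    (l.set n a).getD n d = a := by
  simp [List.getD, h]

theorem getD_set_ne (l : List Int) (n m : Nat) (a d : Int) (h : m ≠ n) :
    (l.set n a).getD m d = l.getD m d := by
  simp [List.getD, h.symm]

theorem getD_mem (l : List (List Int)) (n : Nat) (h : n < l.length) (d : List Int) :
    l.getD n d ∈ l := by
  rw [List.getD_eq_getElem l d h]; exact List.getElem_mem h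

-- "add v into row j of l" — what one A-merge does to the prefix
def bump (l : List (List Int)) (j : Nat) (v : Int) : List (List Int) :=
  l.set j ((l.getD j []).set 1 ((l.getD j []).getD 1 0 + v))

-- "add v into the dict's row at key k" — what one B-step does on a present key
def bumpD (d : PySem.Dict Int (List Int)) (k v : Int) : PySem.Dict Int (List Int) :=
  d.insert k (((d.getD k []).set 1 ((d.getD k []).getD 1 0 + v)))

-- A-side: the inner scan is the identity when no earlier row matches
theorem pa_inner_no_match (l : List (List Int)) (x : List Int) (jp : Nat)
    (hjp : jp ≤ l.length) (h : ∀ r ∈ l, rowKey r ≠ rowKey x) :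
    pa_inner (l ++ [x]) l.length jp = l ++ [x] := by
  induction jp with
  | zero => rfl
  | succ jp ih =>
    have hjl : jp < l.length := by omega
    have hx : (l ++ [x]).getD l.length [] = x := by simp
    have hjd : (l ++ [x]).getD jp [] = l.getD jp [] := List.getD_append l [x] [] jp hjl
    have hne : x.getD 0 0 ≠ (l.getD jp []).getD 0 0 :=
      fun he => h _ (getD_mem l jp hjl []) he.symm
    rw [pa_inner, hx, hjd, if_neg hne, ih (by omega)]

-- A-side: prefix stability — pa_inner on indices inside the prefix ignores the appended row
theorem pa_inner_prefix (l : List (List Int)) (x : List Int) (i jp : Nat)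
    (hi : i < l.length) (hjp : jp ≤ i) :
    pa_inner (l ++ [x]) i jp = pa_inner l i jp ++ [x] := by
  induction jp with
  | zero => rfl
  | succ jp ih =>
    have hjl : jp < l.length := by omega
    have hid : (l ++ [x]).getD i [] = l.getD i [] := List.getD_append l [x] [] i hi
    have hjd : (l ++ [x]).getD jp [] = l.getD jp [] := List.getD_append l [x] [] jp hjl
    rw [pa_inner, pa_inner, hid, hjd]
    split
    · unfold pa_merge
      rw [hid, hjd, List.set_append_left jp _ hjl,
        List.eraseIdx_append_of_lt_length (by simpa using hi) [x]]
    · exact ih (by omega)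

theorem pa_inner_length_ge (l : List (List Int)) (i jp : Nat) (hi : i < l.length) :
    i ≤ (pa_inner l i jp).length ∧ (pa_inner l i jp).length ≤ l.length := by
  induction jp with
  | zero => exact ⟨Nat.le_of_lt hi, le_rfl⟩
  | succ jp ih =>
    rw [pa_inner]
    split
    · unfold pa_merge
      simp only [List.length_eraseIdx, List.length_set]
      split <;> omega
    · exact ih

theorem pa_outer_prefix (l : List (List Int)) (x : List Int) (k : Nat) (hk : k ≤ l.length) :
    pa_outer (l ++ [x]) k = pa_outer l k ++ [x] := by
  induction k generalizing l with
  | zero => rfl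
  | succ k ih =>
    have hkl : k < l.length := by omega
    rw [pa_outer, pa_outer, pa_inner_prefix l x k k hkl le_rfl,
      ih _ (pa_inner_length_ge l k k hkl).1]

-- A-side: the inner scan finds the LAST earlier matching row
theorem pa_inner_finds_last (stones : List (List Int)) (i j : Nat) (jp : Nat)
    (hji : j < jp)
    (hmatch : (stones.getD i []).getD 0 0 = (stones.getD j []).getD 0 0)
    (hnone : ∀ t, j < t → t < jp → (stones.getD i []).getD 0 0 ≠ (stones.getD t []).getD 0 0) :
    pa_inner stones i jp = pa_merge stones i j := by
  induction jp with
  | zero => omega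
  | succ jp ih =>
    rw [pa_inner]
    rcases Nat.lt_or_ge j jp with hlt | hge
    · rw [if_neg (hnone jp hlt (by omega)), ih hlt (fun t h1 h2 => hnone t h1 (by omega))]
    · have : j = jp := by omega
      subst this
      rw [if_pos hmatch]

-- last row satisfying p, as a decomposition
theorem last_split (p : List Int → Prop) [DecidablePred p] (l : List (List Int))
    (h : ∃ r ∈ l, p r) :
    ∃ l₁ y l₂, l = l₁ ++ y :: l₂ ∧ p y ∧ ∀ r ∈ l₂, ¬ p r := by
  induction l with
  | nil => simp at h
  | cons r t ih =>
    by_cases ht : ∃ s ∈ t, p s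
    · obtain ⟨l₁, y, l₂, he, hy, hnone⟩ := ih ht
      exact ⟨r :: l₁, y, l₂, by rw [he]; rfl, hy, hnone⟩
    · push Not at ht
      have hr : p r := by
        rcases h with ⟨s, hs, hps⟩
        rcases List.mem_cons.mp hs with rfl | hst
        · exact hps
        · exact absurd hps (ht s hst)
      exact ⟨[], r, t, rfl, hr, ht⟩

-- B-side: one step is a single keyed insert
theorem pb_step_eq (d : PySem.Dict Int (List Int)) (s : List Int) :
    pb_step d s = d.insert (s.getD 0 0)
      (if d.contains (s.getD 0 0) then
        ((d.getD (s.getD 0 0) []).set 1 ((d.getD (s.getD 0 0) []).getD 1 0 + s.getD 1 0))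
       else s) := by
  unfold pb_step
  dsimp only
  split <;> rfl

theorem contains_fold (l : List (List Int)) (d : PySem.Dict Int (List Int)) (k : Int) :
    (l.foldl pb_step d).contains k = (d.contains k || l.any (fun r => rowKey r == k)) := by
  induction l generalizing d with
  | nil => simp
  | cons r t ih =>
    rw [List.foldl_cons, ih, pb_step_eq]
    simp only [PySem.Dict.contains_insert, List.any_cons, rowKey]
    have hsym : (r.getD 0 0 == k) = (k == r.getD 0 0) := by
      simp [eq_comm]
    rw [hsym]
    cases (k == r.getD 0 0) <;> simp

-- inserts at two distinct keys commute when the first key is already present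
theorem insert_comm_of_contains (d : PySem.Dict Int (List Int)) (kx kr : Int)
    (hc : d.contains kx = true) (hne : kr ≠ kx) (A B : List Int) :
    (d.insert kx A).insert kr B = (d.insert kr B).insert kx A := by
  apply PySem.Dict.ext
  have hcx' : (d.insert kr B).contains kx = true := by
    rw [PySem.Dict.contains_insert]; simp [hc]
  by_cases hr : d.contains kr = true
  · have hcr' : (d.insert kx A).contains kr = true := by
      rw [PySem.Dict.contains_insert]; simp [hr]
    rw [PySem.Dict.items_insert_of_contains _ B hcr',
      PySem.Dict.items_insert_of_contains _ A hc,
      PySem.Dict.items_insert_of_contains _ A hcx',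
      PySem.Dict.items_insert_of_contains _ B hr,
      List.map_map, List.map_map]
    apply List.map_congr_left
    intro p _
    simp only [Function.comp]
    by_cases h1 : p.1 = kx
    · simp [h1, Ne.symm hne]
    · by_cases h2 : p.1 = kr <;> simp [h1, h2, hne]
  · have hr : d.contains kr = false := by simpa using hr
    have hcr' : (d.insert kx A).contains kr = false := by
      rw [PySem.Dict.contains_insert]; simp [hr, hne]
    rw [PySem.Dict.items_insert_of_not_contains _ B hcr',
      PySem.Dict.items_insert_of_contains _ A hc,
      PySem.Dict.items_insert_of_contains _ A hcx',
      PySem.Dict.items_insert_of_not_contains _ B hr,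
      List.map_append]
    simp
    exact fun h => absurd h hne

-- B-side: bumping the dict's row commutes with one fold step
theorem step_bumpD_comm (d : PySem.Dict Int (List Int)) (r : List Int) (kx v : Int)
    (hc : d.contains kx = true) (hd : 2 ≤ (d.getD kx []).length) :
    pb_step (bumpD d kx v) r = bumpD (pb_step d r) kx v := by
  have h1 : 1 < (d.getD kx []).length := by omega
  by_cases hk : r.getD 0 0 = kx
  · simp only [pb_step_eq, bumpD, hk, PySem.Dict.contains_insert, beq_self_eq_true,
      Bool.true_or, if_true, hc, PySem.Dict.getD_insert_self, PySem.Dict.insert_insert_self,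
      List.set_set, getD_set_eq _ 1 _ _ h1]
    ring_nf
  · rw [pb_step_eq, pb_step_eq]
    have hcont : (bumpD d kx v).contains (r.getD 0 0) = d.contains (r.getD 0 0) := by
      have hb : (r.getD 0 0 == kx) = false := by simpa using hk
      unfold bumpD; rw [PySem.Dict.contains_insert, hb, Bool.false_or]
    have hgetD : (bumpD d kx v).getD (r.getD 0 0) [] = d.getD (r.getD 0 0) [] :=
      PySem.Dict.getD_insert_of_ne _ _ _ hk
    rw [hcont, hgetD]
    unfold bumpD
    rw [PySem.Dict.getD_insert_of_ne _ _ _ (Ne.symm hk)]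
    split <;> exact insert_comm_of_contains _ _ _ hc hk _ _

-- B-side: bumping the dict commutes with the rest of the fold
theorem fold_bumpD_comm (t : List (List Int)) (d : PySem.Dict Int (List Int)) (kx v : Int)
    (hc : d.contains kx = true) (hd : 2 ≤ (d.getD kx []).length) :
    t.foldl pb_step (bumpD d kx v) = bumpD (t.foldl pb_step d) kx v := by
  induction t generalizing d with
  | nil => rfl
  | cons r t ih =>
    rw [List.foldl_cons, List.foldl_cons, step_bumpD_comm d r kx v hc hd]
    refine ih (pb_step d r) ?_ ?_
    · rw [pb_step_eq, PySem.Dict.contains_insert]; simp [hc]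
    · by_cases hk : r.getD 0 0 = kx
      · rw [pb_step_eq, hk, PySem.Dict.getD_insert_self, if_pos hc]
        simpa using hd
      · rw [pb_step_eq, PySem.Dict.getD_insert_of_ne _ _ _ (Ne.symm hk)]
        exact hd

-- B-side main lemma: folding the bumped list is bumping the folded dict
theorem fold_bump (l : List (List Int)) (d : PySem.Dict Int (List Int)) (j : Nat) (kx v : Int)
    (hj : j < l.length) (hk : rowKey (l.getD j []) = kx) (hlen : 2 ≤ (l.getD j []).length)
    (hrows : ∀ r ∈ l, rowKey r = kx → 2 ≤ r.length)
    (hd : d.contains kx = true → 2 ≤ (d.getD kx []).length) :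
    (bump l j v).foldl pb_step d = bumpD (l.foldl pb_step d) kx v := by
  induction l generalizing d j with
  | nil => simp at hj
  | cons r t ih =>
    cases j with
    | zero =>
      have hkr : r.getD 0 0 = kx := hk
      have hlenr : 2 ≤ r.length := hlen
      have h1r : 1 < r.length := by omega
      have hrk0 : (r.set 1 (r.getD 1 0 + v)).getD 0 0 = kx := by
        rw [← hkr]; exact getD_set_ne r 1 0 _ 0 (by omega)
      have hstep : pb_step d (r.set 1 (r.getD 1 0 + v)) = bumpD (pb_step d r) kx v := by
        by_cases hcd : d.contains kx = true
        · have h1d : 1 < (d.getD kx []).length := by have := hd hcd; omega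
          simp only [pb_step_eq, bumpD, hrk0, hkr, hcd, if_true,
            PySem.Dict.getD_insert_self, PySem.Dict.insert_insert_self, List.set_set,
            getD_set_eq _ 1 _ _ h1d, getD_set_eq _ 1 _ _ h1r]
          ring_nf
        · have hcd' : d.contains kx = false := by simpa using hcd
          simp only [pb_step_eq, bumpD, hrk0, hkr, hcd', if_false, Bool.false_eq_true,
            PySem.Dict.getD_insert_self, PySem.Dict.insert_insert_self,
            getD_set_eq _ 1 _ _ h1r]
      have hbump : bump (r :: t) 0 v = (r.set 1 (r.getD 1 0 + v)) :: t := by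
        simp [bump]
      rw [hbump, List.foldl_cons, List.foldl_cons, hstep]
      apply fold_bumpD_comm
      · rw [pb_step_eq, PySem.Dict.contains_insert, hkr]; simp
      · by_cases hcd : d.contains kx = true
        · rw [pb_step_eq, hkr, PySem.Dict.getD_insert_self, if_pos hcd]
          simpa using hd hcd
        · have hcd' : d.contains kx = false := by simpa using hcd
          rw [pb_step_eq, hkr, PySem.Dict.getD_insert_self, hcd']
          simpa using hlenr
    | succ j' =>
      have hbump : bump (r :: t) (j' + 1) v = r :: bump t j' v := by
        simp [bump]
      rw [hbump, List.foldl_cons, List.foldl_cons]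
      refine ih (pb_step d r) j' (by simpa using hj) (by simpa using hk) (by simpa using hlen)
        (fun s hs => hrows s (List.mem_cons_of_mem r hs)) ?_
      intro hcont
      by_cases hkr : r.getD 0 0 = kx
      · rw [pb_step_eq, hkr, PySem.Dict.getD_insert_self]
        by_cases hcd : d.contains kx = true
        · rw [if_pos hcd]; simpa using hd hcd
        · have hcd' : d.contains kx = false := by simpa using hcd
          rw [hcd']
          simpa using hrows r (by simp) hkr
      · rw [pb_step_eq, PySem.Dict.getD_insert_of_ne _ _ _ (Ne.symm hkr)]
        apply hd
        have hb : (kx == r.getD 0 0) = false := by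
          simpa using fun h => hkr h.symm
        rw [pb_step_eq, PySem.Dict.contains_insert, hb, Bool.false_or] at hcont
        exact hcont

-- Pre_ is preserved by one A-merge of the appended row into the prefix
theorem pre_bump (l : List (List Int)) (x : List Int) (j : Nat)
    (hj : j < l.length) (hk : rowKey (l.getD j []) = rowKey x)
    (hpre : Pre_count_amount (l ++ [x])) :
    Pre_count_amount (bump l j (x.getD 1 0)) := by
  have hy := getD_mem l j hj []
  have hkx : (x.getD 0 0 == (l.getD j []).getD 0 0) = true := by
    rw [beq_iff_eq]; exact hk.symm
  have hcy : 2 ≤ ((l ++ [x]).countP (fun m => m.getD 0 0 == (l.getD j []).getD 0 0)) := by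
    rw [List.countP_append]
    have h1 : 0 < l.countP (fun m => m.getD 0 0 == (l.getD j []).getD 0 0) :=
      List.countP_pos_iff.mpr ⟨_, hy, by simp⟩
    have h2 : (List.countP (fun m => m.getD 0 0 == (l.getD j []).getD 0 0) [x]) = 1 := by
      simp only [List.countP_cons, List.countP_nil, hkx, if_true]
    omega
  have hylen : 2 ≤ (l.getD j []).length := by
    rcases (hpre _ (List.mem_append_left [x] hy)).2 with hle | h2
    · omega
    · exact h2
  intro r hr
  have hylen' : 2 ≤ ((l.getD j []).set 1 ((l.getD j []).getD 1 0 + x.getD 1 0)).length := by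
    simpa using hylen
  have hcount : ∀ (c : Int), (bump l j (x.getD 1 0)).countP (fun m => m.getD 0 0 == c) ≤
      (l ++ [x]).countP (fun m => m.getD 0 0 == c) := by
    intro c
    unfold bump
    rw [List.countP_set hj, List.countP_append]
    have hsame : (((l.getD j []).set 1 ((l.getD j []).getD 1 0 + x.getD 1 0)).getD 0 0 == c)
        = (l[j].getD 0 0 == c) := by
      rw [getD_set_ne _ 1 0 _ 0 (by omega), List.getD_eq_getElem l [] hj]
    rw [hsame]
    split
    · have h1 : 0 < l.countP (fun m => m.getD 0 0 == c) :=
        List.countP_pos_iff.mpr ⟨_, List.getElem_mem hj, by assumption⟩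
      omega
    · omega
  rcases List.mem_or_eq_of_mem_set hr with hrl | hry
  · obtain ⟨hne, hcnt⟩ := hpre r (List.mem_append_left [x] hrl)
    refine ⟨hne, ?_⟩
    rcases hcnt with hle | h2
    · exact Or.inl (le_trans (hcount _) hle)
    · exact Or.inr h2
  · subst hry
    refine ⟨?_, Or.inr hylen'⟩
    intro hnil
    rw [hnil] at hylen'
    simp at hylen'

theorem main_ind : ∀ n (stones : List (List Int)), stones.length = n →
    Pre_count_amount stones → count_amount stones = count_amount_alt stones := by
  intro n
  induction n using Nat.strong_induction_on with
  | _ n ih =>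
    intro stones hlen hpre
    rcases List.eq_nil_or_concat' stones with rfl | ⟨l, x, rfl⟩
    · rfl
    · have hlx : (l ++ [x]).length = l.length + 1 := by simp
      have hxmem : x ∈ l ++ [x] := by simp
      have hpre_l : Pre_count_amount l := by
        intro r hr
        obtain ⟨hne, hc⟩ := hpre r (List.mem_append_left [x] hr)
        refine ⟨hne, ?_⟩
        rcases hc with hle | h2
        · left
          rw [List.countP_append] at hle
          omega
        · exact Or.inr h2
      have hrows : ∀ r ∈ l, rowKey r = rowKey x → 2 ≤ r.length := by
        intro r hr hkr
        rcases (hpre r (List.mem_append_left [x] hr)).2 with hle | h2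
        · exfalso
          have hx1 : (List.countP (fun m => m.getD 0 0 == r.getD 0 0) [x]) = 1 := by
            simp only [List.countP_cons, List.countP_nil, beq_iff_eq]
            have hif : x.getD 0 0 = r.getD 0 0 := hkr.symm
            rw [if_pos hif]
          have hr1 : 0 < l.countP (fun m => m.getD 0 0 == r.getD 0 0) :=
            List.countP_pos_iff.mpr ⟨r, hr, by simp⟩
          rw [List.countP_append, hx1] at hle
          omega
        · exact h2
      by_cases hm : ∃ r ∈ l, rowKey r = rowKey x
      · obtain ⟨l₁, y, l₂, he, hy, hno⟩ :=
          last_split (fun r => rowKey r = rowKey x) l hm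
        have hjlt : l₁.length < l.length := by rw [he]; simp
        have hgy : l.getD l₁.length [] = y := by
          rw [he, List.getD_append_right _ _ _ _ le_rfl]
          simp
        have hmatch : ((l ++ [x]).getD l.length []).getD 0 0 = ((l ++ [x]).getD l₁.length []).getD 0 0 := by
          rw [List.getD_append l [x] [] l₁.length hjlt, hgy]
          have hxg : (l ++ [x]).getD l.length [] = x := by simp
          rw [hxg]
          exact (hy : y.getD 0 0 = x.getD 0 0).symm
        have hnone : ∀ t, l₁.length < t → t < l.length →
            ((l ++ [x]).getD l.length []).getD 0 0 ≠ ((l ++ [x]).getD t []).getD 0 0 := by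
          intro t ht1 ht2
          have hl2 : t - l₁.length - 1 < l₂.length := by
            have : l.length = l₁.length + 1 + l₂.length := by rw [he]; simp; omega
            omega
          have hgt : (l ++ [x]).getD t [] = l₂.getD (t - l₁.length - 1) [] := by
            rw [List.getD_append l [x] [] t ht2, he,
              List.getD_append_right _ _ _ _ (by omega)]
            have : t - l₁.length = (t - l₁.length - 1) + 1 := by omega
            rw [this]
            simp
          rw [hgt]
          have hmem := getD_mem l₂ (t - l₁.length - 1) hl2 []
          have hnr := hno _ hmem
          intro hcon
          apply hnr
          show rowKey _ = rowKey x
          rw [rowKey, rowKey, ← hcon]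
          simp
        have hmerge : pa_merge (l ++ [x]) l.length l₁.length = bump l l₁.length (x.getD 1 0) := by
          unfold pa_merge bump
          have hxg : (l ++ [x]).getD l.length [] = x := by simp
          rw [hxg, List.getD_append l [x] [] l₁.length hjlt,
            List.set_append_left l₁.length _ hjlt,
            List.eraseIdx_append_of_length_le (by simp) [x]]
          simp
        have h2y : 2 ≤ (l.getD l₁.length []).length := by
          apply hrows _ (getD_mem l l₁.length hjlt []) _
          rw [hgy]; exact hy
        have hA : count_amount (l ++ [x]) = count_amount (bump l l₁.length (x.getD 1 0)) := by
          rw [count_amount, hlx, pa_outer,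
            pa_inner_finds_last (l ++ [x]) l.length l₁.length l.length hjlt hmatch hnone,
            hmerge, count_amount]
          congr 1
          simp [bump]
        have hpre_b : Pre_count_amount (bump l l₁.length (x.getD 1 0)) :=
          pre_bump l x l₁.length hjlt (by rw [hgy]; exact hy) hpre
        have hlb : (bump l l₁.length (x.getD 1 0)).length = l.length := by simp [bump]
        have hih := ih l.length (by omega) (bump l l₁.length (x.getD 1 0)) hlb hpre_b
        have hcf : (l.foldl pb_step PySem.Dict.empty).contains (x.getD 0 0) = true := by
          rw [contains_fold]
          have : l.any (fun r => rowKey r == x.getD 0 0) = true :=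
            List.any_eq_true.mpr ⟨y, he ▸ (by simp), by rw [beq_iff_eq]; exact hy⟩
          rw [this, Bool.or_true]
        have hB : count_amount_alt (l ++ [x]) = count_amount_alt (bump l l₁.length (x.getD 1 0)) := by
          rw [count_amount_alt, count_amount_alt, List.foldl_append, List.foldl_cons,
            List.foldl_nil, pb_step_eq, hcf, if_pos rfl,
            fold_bump l PySem.Dict.empty l₁.length (x.getD 0 0) (x.getD 1 0) hjlt
              (by rw [hgy]; exact hy) h2y hrows
              (by rw [PySem.Dict.contains_empty]; intro h; cases h)]
          rfl
        rw [hA, hih, ← hB]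
      · push Not at hm
        have hA : count_amount (l ++ [x]) = count_amount l ++ [x] := by
          rw [count_amount, hlx, pa_outer,
            pa_inner_no_match l x l.length le_rfl (fun r hr => hm r hr),
            pa_outer_prefix l x l.length le_rfl, count_amount]
        have hcf : (l.foldl pb_step PySem.Dict.empty).contains (x.getD 0 0) = false := by
          rw [contains_fold, PySem.Dict.contains_empty, Bool.false_or]
          rw [List.any_eq_false]
          intro r hr
          simpa using hm r hr
        have hB : count_amount_alt (l ++ [x]) = count_amount_alt l ++ [x] := by
          rw [count_amount_alt, count_amount_alt, List.foldl_append, List.foldl_cons,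
            List.foldl_nil, pb_step_eq, hcf]
          rw [if_neg (by simp)]
          simp only [PySem.Dict.values,
            PySem.Dict.items_insert_of_not_contains _ _ hcf, List.map_append]
          rfl
        rw [hA, hB, ih l.length (by omega) l rfl hpre_l]

-- ===== VERDICT (by name: the statement is the Claim_ definition above) =====
theorem count_amount_spec : Claim_equal_count_amount := by
  intro stones _ hpre
  unfold Spec_count_amount
  exact main_ind stones.length stones rfl hpre
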